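-- pv_equiv track=rewrite | github.com/dudamarlena/pyc_source | pycfiles/xdis-4.5.1-py2.4/bytecode.py | offset2line
-- ===== SOURCE A (Python) =====
-- def offset2line(offset, linestarts):
--     """linestarts is expected to be a *list) of (offset, line number)
--     where both offset and line number are in increasing order.
--     Return the closes line number at or below the offset.
--     If offset is less than the first line number given in linestarts,
--     return line number 0.
--     """
--     if len(linestarts) == 0 or offset < linestarts[0][0]:
--         return 0
--     low = 0
--     high = len(linestarts) - 1
--     mid = (low + high + 1) // 2
--     while low <= high:
--         if linestarts[mid][0] > offset:
--             high = mid - 1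
--         elif linestarts[mid][0] < offset:
--             low = mid + 1
--         else:
--             return linestarts[mid][1]
--         mid = (low + high + 1) // 2
--
--     if mid >= len(linestarts):
--         return linestarts[(len(linestarts) - 1)][1]
--     return linestarts[high][1]
-- ===== SOURCE B (Python) =====
-- def offset2line(offset, linestarts):
--     """Single linear pass instead of binary search: track the line number of
--     the last entry whose offset is <= the target, break once past it."""
--     if len(linestarts) == 0 or offset < linestarts[0][0]:
--         return 0
--     line = 0
--     for off, ln in linestarts:
--         if off > offset:
--             break
--         line = ln
--     return line
-- ===== Notes on version B (the rewrite author's own statement) =====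
-- stated objective: simpler
-- what changed: Replaces the hand-written binary search over indices with a single linear scan that keeps the line of the last entry whose offset is <= the target, breaking at the first larger offset; Pre_ excludes lists where some entry at or above the target precedes an entry at or below it (violating the documented increasing-offset order), where the binary search's landing point is accidental.
-- outside the precondition, e.g. on offset2line(4, [(3, 5), (6, 1), (4, 2), (3, 5)]): A returns 2, B returns 5
import Mathlib
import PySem

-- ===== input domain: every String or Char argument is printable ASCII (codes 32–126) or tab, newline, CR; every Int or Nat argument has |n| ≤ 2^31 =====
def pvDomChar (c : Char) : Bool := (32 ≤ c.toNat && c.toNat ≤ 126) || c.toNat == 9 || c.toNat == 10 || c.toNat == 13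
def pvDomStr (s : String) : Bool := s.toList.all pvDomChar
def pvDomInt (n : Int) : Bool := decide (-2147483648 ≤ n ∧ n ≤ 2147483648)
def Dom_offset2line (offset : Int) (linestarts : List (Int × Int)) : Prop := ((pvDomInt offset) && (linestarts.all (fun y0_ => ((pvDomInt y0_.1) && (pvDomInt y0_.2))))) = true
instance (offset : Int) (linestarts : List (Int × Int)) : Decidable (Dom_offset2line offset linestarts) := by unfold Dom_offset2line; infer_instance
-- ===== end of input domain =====

-- B replaces A's hand-written binary search with a single linear scan (simpler, not faster);
-- both agree on the docstring's domain of strictly increasing offsets (Pre_).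

-- ===== PORT A =====
-- the while-loop of A: state (low, high), mid recomputed each turn; indexing is always
-- in range on admitted inputs, so the `.getD (0, 0)` default is never the value used
def offset2lineLoop (offset : Int) (xs : List (Int × Int)) (low high : Int) : Int :=
  let mid := PySem.Int.floordiv (low + high + 1) 2
  if _h : low ≤ high then
    let e := (PySem.List.pyGet? xs mid).getD (0, 0)
    if e.1 > offset then offset2lineLoop offset xs low (mid - 1)
    else if e.1 < offset then offset2lineLoop offset xs (mid + 1) high
    else e.2
  else
    if mid ≥ (xs.length : Int) then
      ((PySem.List.pyGet? xs ((xs.length : Int) - 1)).getD (0, 0)).2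
    else
      ((PySem.List.pyGet? xs high).getD (0, 0)).2
termination_by (high - low + 1).toNat
decreasing_by
  · have h2 : PySem.Int.floordiv (low + high + 1) 2 < high + 1 := by
      rw [PySem.Int.floordiv_lt_iff_lt_mul (by omega)]; omega
    omega
  · have h1 : low ≤ PySem.Int.floordiv (low + high + 1) 2 := by
      rw [PySem.Int.le_floordiv_iff_mul_le (by omega)]; omega
    omega

def offset2line (offset : Int) (linestarts : List (Int × Int)) : Int :=
  if linestarts.length = 0 ∨ offset < ((PySem.List.pyGet? linestarts 0).getD (0, 0)).1 then 0
  else offset2lineLoop offset linestarts 0 ((linestarts.length : Int) - 1)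

-- ===== PORT B =====
-- Source B's for-loop with break: keep the line of the last entry with offset ≤ target
def offset2lineScan (offset : Int) : List (Int × Int) → Int → Int
  | [], line => line
  | (o, l) :: rest, line => if o > offset then line else offset2lineScan offset rest l

def offset2line_alt (offset : Int) (linestarts : List (Int × Int)) : Int :=
  if linestarts.length = 0 ∨ offset < ((PySem.List.pyGet? linestarts 0).getD (0, 0)).1 then 0
  else offset2lineScan offset linestarts 0

-- ===== PRECONDITION & SPEC =====
-- Pre_ excludes lists on which, relative to the target, some entry at or above the offset
-- precedes an entry at or below it — impossible on the documented increasing-offset lists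
-- (any strictly increasing list satisfies Pre_ for every target); there the landing point of
-- A's binary search is an artefact of the search path and B's last-≤ scan may differ.
def Pre_offset2line (offset : Int) (linestarts : List (Int × Int)) : Prop :=
  linestarts.Pairwise (fun a b => offset ≤ a.1 → offset < b.1)
instance (offset : Int) (linestarts : List (Int × Int)) : Decidable (Pre_offset2line offset linestarts) := by unfold Pre_offset2line; infer_instance

def pvWitness_offset2line : Int × (List (Int × Int)) := (7, [(0, 1), (5, 2), (10, 3)])

def Spec_offset2line (offset : Int) (linestarts : List (Int × Int)) (out : Int) : Prop := out = offset2line_alt offset linestarts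
instance (offset : Int) (linestarts : List (Int × Int)) (out : Int) : Decidable (Spec_offset2line offset linestarts out) := by unfold Spec_offset2line; infer_instance

-- ===== CLAIM (what is proved, stated in full; the proofs are below) =====
def Claim_equal_offset2line : Prop := ∀ (offset : Int) (linestarts : List (Int × Int)), Dom_offset2line offset linestarts → Pre_offset2line offset linestarts → Spec_offset2line offset linestarts (offset2line offset linestarts)

-- ===== LEMMAS AND PROOFS =====

-- the element at which takeWhile stopped fails the predicate
lemma takeWhile_stop_false {α : Type} (p : α → Bool) :
    ∀ (xs : List α) (k : Nat), (xs.takeWhile p).length = k → (h : k < xs.length) →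
      p (xs[k]) = false := by
  intro xs
  induction xs with
  | nil => simp
  | cons a l ih =>
    intro k hk h
    by_cases hp : p a
    · rw [List.takeWhile_cons_of_pos hp] at hk
      cases k with
      | zero => simp at hk
      | succ k' =>
        simp only [List.length_cons, Nat.add_right_cancel_iff] at hk
        simpa using ih k' hk (by simpa using h)
    · rw [List.takeWhile_cons_of_neg hp] at hk
      simp only [List.length_nil] at hk
      subst hk
      simpa using hp

-- A's loop returns xs[j].2 when j is the last index whose offset is ≤ target.
lemma offset2lineLoop_eq (offset : Int) (xs : List (Int × Int)) (j : Nat)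
    (hj : j < xs.length)
    (hjle : xs[j].1 ≤ offset)
    (hjgt : ∀ i : Nat, (hi : i < xs.length) → j < i → offset < xs[i].1)
    (hjlt : ∀ i : Nat, (hi : i < xs.length) → i < j → xs[i].1 < offset) :
    ∀ low high : Int, 0 ≤ low → low ≤ high + 1 → high < (xs.length : Int) →
      low ≤ (j : Int) + 1 → (j : Int) ≤ high →
      offset2lineLoop offset xs low high = xs[j].2 := by
  suffices H : ∀ n : Nat, ∀ low high : Int, (high - low + 1).toNat = n →
      0 ≤ low → low ≤ high + 1 → high < (xs.length : Int) →
      low ≤ (j : Int) + 1 → (j : Int) ≤ high →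
      offset2lineLoop offset xs low high = xs[j].2 by
    intro low high h1 h2 h3 h4 h5
    exact H _ low high rfl h1 h2 h3 h4 h5
  intro n
  induction n using Nat.strong_induction_on with
  | _ n ih =>
    intro low high hn h0 hlh hh hlo hhi
    rw [offset2lineLoop]
    by_cases hc : low ≤ high
    · -- loop body: mid is in [low, high], hence a valid index
      have hmidlo : low ≤ PySem.Int.floordiv (low + high + 1) 2 := by
        rw [PySem.Int.le_floordiv_iff_mul_le (by omega)]; omega
      have hmidhi : PySem.Int.floordiv (low + high + 1) 2 < high + 1 := by
        rw [PySem.Int.floordiv_lt_iff_lt_mul (by omega)]; omega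
      set mid := PySem.Int.floordiv (low + high + 1) 2 with hmid
      have hm : mid.toNat < xs.length := by omega
      have hget : PySem.List.pyGet? xs mid = some (xs[mid.toNat]) :=
        (PySem.List.pyGet?_of_nonneg xs (by omega)).trans (List.getElem?_eq_getElem hm)
      simp only [dif_pos hc, hget, Option.getD_some]
      by_cases hgt : xs[mid.toNat].1 > offset
      · -- offsets at mid too big: j < mid
        have hjm : (j : Int) < mid := by
          by_contra hcon
          rcases Nat.lt_or_ge mid.toNat j with h' | h'
          · exact absurd (hjlt mid.toNat hm h') (by omega)
          · have hmj2 : mid.toNat = j := by omega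
            simp only [hmj2] at hgt; omega
        rw [if_pos hgt]
        exact ih _ (by omega) low (mid - 1) rfl h0 (by omega) (by omega) hlo (by omega)
      · rw [if_neg hgt]
        by_cases hlt : xs[mid.toNat].1 < offset
        · -- offset at mid too small: mid ≤ j
          have hjm : mid ≤ (j : Int) := by
            by_contra hcon
            exact absurd (hjgt mid.toNat hm (by omega)) (by omega)
          rw [if_pos hlt]
          exact ih _ (by omega) (mid + 1) high rfl (by omega) (by omega) hh (by omega) hhi
        · -- exact hit: mid = j
          rw [if_neg hlt]
          have heq : xs[mid.toNat].1 = offset := by omega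
          have : mid.toNat = j := by
            rcases Nat.lt_trichotomy mid.toNat j with h' | h' | h'
            · exact absurd (hjlt mid.toNat hm h') (by omega)
            · exact h'
            · exact absurd (hjgt mid.toNat hm h') (by omega)
          simp only [this]
    · -- exit: low = high + 1 and high = j
      have hexit : low = high + 1 := by omega
      have hhj : high = (j : Int) := by omega
      have hmid : PySem.Int.floordiv (low + high + 1) 2 = (j : Int) + 1 := by
        rw [PySem.Int.floordiv_eq_iff_of_pos (by omega)]; omega
      simp only [dif_neg hc]
      rw [hmid]
      by_cases hlen : (j : Int) + 1 ≥ (xs.length : Int)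
      · rw [if_pos hlen, PySem.List.pyGet?_of_nonneg xs (by omega)]
        have hidx : ((xs.length : Int) - 1).toNat = j := by omega
        rw [hidx, List.getElem?_eq_getElem hj, Option.getD_some]
      · rw [if_neg hlen, hhj, PySem.List.pyGet?_of_nonneg xs (by omega)]
        have hidx : ((j : Nat) : Int).toNat = j := by omega
        rw [hidx, List.getElem?_eq_getElem hj, Option.getD_some]

-- B's scan returns the last entry of the ≤-prefix (accumulator if that prefix is empty).
lemma offset2lineScan_eq (offset : Int) (xs : List (Int × Int)) :
    ∀ acc : Int, offset2lineScan offset xs acc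
      = ((xs.takeWhile (fun e => decide (e.1 ≤ offset))).getLastD (0, acc)).2 := by
  induction xs with
  | nil => intro acc; simp [offset2lineScan]
  | cons hd tl ih =>
    intro acc
    obtain ⟨o, l⟩ := hd
    by_cases h : o > offset
    · rw [List.takeWhile_cons_of_neg (by simpa using (by omega : ¬ o ≤ offset))]
      simp [offset2lineScan, h]
    · rw [List.takeWhile_cons_of_pos (by simpa using (by omega : o ≤ offset))]
      rw [List.getLastD_cons]
      simp only [offset2lineScan, if_neg h, ih l]
      cases htw : tl.takeWhile (fun e => decide (e.1 ≤ offset)) with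
      | nil => simp
      | cons a as =>
        obtain ⟨v, hv⟩ := Option.isSome_iff_exists.mp (by simp : (a :: as).getLast?.isSome)
        simp [hv]

-- ===== VERDICT (by name: the statement is the Claim_ definition above) =====
theorem offset2line_spec : Claim_equal_offset2line := by
  intro offset xs _hdom hpre
  unfold Spec_offset2line offset2line offset2line_alt
  by_cases hg : xs.length = 0 ∨ offset < ((PySem.List.pyGet? xs 0).getD (0, 0)).1
  · rw [if_pos hg, if_pos hg]
  · rw [if_neg hg, if_neg hg]
    push Not at hg
    obtain ⟨hne, hhead⟩ := hg
    have hlen : 0 < xs.length := Nat.pos_of_ne_zero hne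
    have hget0 : PySem.List.pyGet? xs 0 = some (xs[0]) := by
      rw [show (0 : Int) = ((0 : Nat) : Int) from rfl, PySem.List.pyGet?_natCast,
        List.getElem?_eq_getElem hlen]
    rw [hget0, Option.getD_some] at hhead
    -- j := last index with offset ≤ target, via the takeWhile prefix
    set p : (Int × Int) → Bool := fun e => decide (e.1 ≤ offset) with hp
    set tw := xs.takeWhile p with htw
    have hklen : tw.length ≤ xs.length := (List.takeWhile_prefix p).length_le
    have hk1 : 0 < tw.length := by
      rcases xs with _ | ⟨x, rest⟩
      · simp at hlen
      · simp only [htw, hp]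
        rw [List.takeWhile_cons_of_pos (by simpa using hhead)]
        simp
    set j := tw.length - 1 with hj
    have hjlt_aux_len : j < xs.length := by omega
    have hjtw : j < tw.length := by omega
    have hjle : xs[j].1 ≤ offset := by
      have hmem := List.mem_takeWhile_imp (p := p) (l := xs) (List.getElem_mem hjtw)
      have hEq : tw[j] = xs[j]'hjlt_aux_len := (List.takeWhile_prefix p).getElem hjtw
      rw [hEq] at hmem
      simpa [hp] using hmem
    have hR := (List.pairwise_iff_getElem).1 hpre
    have hjgt : ∀ i : Nat, (hi : i < xs.length) → j < i → offset < xs[i].1 := by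
      intro i hi hji
      have hkx : tw.length < xs.length := by omega
      have hkfail : p (xs[tw.length]) = false := takeWhile_stop_false p xs tw.length rfl hkx
      have hkgt : offset < xs[tw.length].1 := by
        simp only [hp, decide_eq_false_iff_not, not_le] at hkfail
        exact hkfail
      rcases Nat.lt_or_ge tw.length i with h' | h'
      · exact hR tw.length i hkx hi h' (by omega)
      · have hit : i = tw.length := by omega
        subst hit; exact hkgt
    have hjlt : ∀ i : Nat, (hi : i < xs.length) → i < j → xs[i].1 < offset := by
      intro i hi hij
      by_contra hcon
      exact absurd (hR i j hi hjlt_aux_len hij (by omega)) (by omega)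
    rw [offset2lineLoop_eq offset xs j hjlt_aux_len hjle hjgt hjlt 0 ((xs.length : Int) - 1)
      (by omega) (by omega) (by omega) (by omega) (by omega)]
    rw [offset2lineScan_eq offset xs 0]
    rw [← hp, ← htw, List.getLastD_eq_getLast?, List.getLast?_eq_getElem?]
    rw [List.getElem?_eq_getElem hjtw, Option.getD_some,
      (List.takeWhile_prefix p).getElem hjtw]
    rfl
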